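-- pv_equiv track=rewrite | github.com/JB8238/myomi-index-app | prof_index_calculation.py | split_int_to_17_chunks
-- ===== SOURCE A (Python) =====
-- def split_int_to_17_chunks(n: int):
--     """nを最大3つの（<=17）に分割。残りが出る（>51）場合は切り捨て運用にする。"""
--     chunks = []
--     rem = max(0, int(n))
--     for _ in range(3):
--         c = min(17, rem)
--         chunks.append(c)
--         rem -= c
--     return chunks  # [m5, m6, m7]
-- ===== SOURCE B (Python) =====
-- def split_int_to_17_chunks(n: int):
--     """nを最大3つの（<=17）に分割。残りが出る（>51）場合は切り捨て運用にする。"""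
--     m = max(0, int(n))
--     if m >= 34:
--         return [17, 17, min(17, m - 34)]
--     elif m >= 17:
--         return [17, m - 17, 0]
--     else:
--         return [m, 0, 0]
-- ===== Notes on version B (the rewrite author's own statement) =====
-- stated objective: simpler
-- what changed: Replaces the three-iteration accumulator loop (running remainder, list append) with a stateless branch ladder that computes the three chunks directly in closed form.
import Mathlib
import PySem

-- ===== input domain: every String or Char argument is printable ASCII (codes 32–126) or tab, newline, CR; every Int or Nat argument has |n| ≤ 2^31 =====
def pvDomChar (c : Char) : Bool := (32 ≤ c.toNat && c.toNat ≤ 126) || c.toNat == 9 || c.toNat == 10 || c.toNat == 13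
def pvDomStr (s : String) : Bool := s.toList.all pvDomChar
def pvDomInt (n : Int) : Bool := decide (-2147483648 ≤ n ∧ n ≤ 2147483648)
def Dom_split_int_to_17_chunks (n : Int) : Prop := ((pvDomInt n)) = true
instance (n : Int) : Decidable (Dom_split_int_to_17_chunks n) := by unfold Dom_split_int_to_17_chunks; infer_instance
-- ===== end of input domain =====

-- B replaces A's 3-iteration running-remainder loop with a stateless branch ladder (simpler decomposition).

-- ===== PORT A =====
-- for _ in range(3): c = min(17, rem); chunks.append(c); rem -= c
def split_int_to_17_chunks (n : Int) : List Int :=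
  let rem : Int := max 0 n
  let res := (PySem.List.pyRange 0 3 1).foldl
    (fun (st : List Int × Int) _ =>
      let c := min 17 st.2
      (st.1 ++ [c], st.2 - c))
    ([], rem)
  res.1

-- ===== PORT B =====
def split_int_to_17_chunks_alt (n : Int) : List Int :=
  let m : Int := max 0 n
  if m ≥ 34 then [17, 17, min 17 (m - 34)]
  else if m ≥ 17 then [17, m - 17, 0]
  else [m, 0, 0]

-- ===== PRECONDITION & SPEC =====
def Spec_split_int_to_17_chunks (n : Int) (out : List Int) : Prop := out = split_int_to_17_chunks_alt n
instance (n : Int) (out : List Int) : Decidable (Spec_split_int_to_17_chunks n out) := by unfold Spec_split_int_to_17_chunks; infer_instance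

-- ===== CLAIM (what is proved, stated in full; the proofs are below) =====
def Claim_equal_split_int_to_17_chunks : Prop := ∀ (n : Int), Dom_split_int_to_17_chunks n → Spec_split_int_to_17_chunks n (split_int_to_17_chunks n)

-- ===== LEMMAS AND PROOFS =====

-- ===== VERDICT (by name: the statement is the Claim_ definition above) =====
theorem split_int_to_17_chunks_spec : Claim_equal_split_int_to_17_chunks := by
  intro n _
  unfold Spec_split_int_to_17_chunks split_int_to_17_chunks split_int_to_17_chunks_alt
  have h : PySem.List.pyRange 0 3 1 = [0, 1, 2] := by decide
  rw [h]
  simp only [List.foldl]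
  split_ifs <;> simp [min_def] <;> split_ifs <;> try omega
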